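-- pv_equiv track=rewrite | github.com/manoj-jeswani/vys | logical/download.py | uconvert
-- ===== SOURCE A (Python) =====
-- def uconvert(title):
--     res=""
--     for i in title:
--         if ord(i) in range(ord('A'),ord('Z')+1) or ord(i) in range(ord('a'),ord('z')+1):
--             res=res+i
--         else:
--             res=res+'_'
--     return res
-- ===== SOURCE B (Python) =====
-- import re
--
-- def uconvert(title):
--     return re.sub(r'[^A-Za-z]', '_', title)
-- ===== Notes on version B (the rewrite author's own statement) =====
-- stated objective: faster
-- what changed: Replaces the per-character loop that grows the result by string concatenation with a single regex substitution over the whole string.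
import Mathlib
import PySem

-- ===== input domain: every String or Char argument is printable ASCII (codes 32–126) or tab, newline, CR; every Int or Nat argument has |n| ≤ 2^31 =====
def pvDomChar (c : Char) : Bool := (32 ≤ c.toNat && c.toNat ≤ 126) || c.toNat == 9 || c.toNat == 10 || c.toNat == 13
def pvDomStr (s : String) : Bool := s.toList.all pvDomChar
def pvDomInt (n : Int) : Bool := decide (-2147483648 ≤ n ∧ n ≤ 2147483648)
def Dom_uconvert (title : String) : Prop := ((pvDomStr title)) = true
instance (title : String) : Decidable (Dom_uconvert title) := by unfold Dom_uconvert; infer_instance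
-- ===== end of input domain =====

-- ===== PORT A =====
-- B replaces A's accumulating character loop by one regex substitution (re.sub).
def uconvert (title : String) : String :=
  title.toList.foldl (fun res i =>
    if ('A'.toNat ≤ i.toNat ∧ i.toNat ≤ 'Z'.toNat) ∨ ('a'.toNat ≤ i.toNat ∧ i.toNat ≤ 'z'.toNat) then
      res ++ String.ofList [i]
    else
      res ++ "_") ""

-- ===== PORT B =====
-- Port of re.sub(r'[^A-Za-z]', '_', title): the regex engine scans the string and
-- rewrites each character that is not an ASCII letter to '_'; Char.isAlpha is exactly [A-Za-z].
def subNonLetters : List Char → List Char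
  | [] => []
  | c :: cs => (if c.isAlpha then c else '_') :: subNonLetters cs

def uconvert_alt (title : String) : String :=
  String.ofList (subNonLetters title.toList)

-- ===== PRECONDITION & SPEC =====
def Spec_uconvert (title : String) (out : String) : Prop := out = uconvert_alt title
instance (title : String) (out : String) : Decidable (Spec_uconvert title out) := by unfold Spec_uconvert; infer_instance

-- ===== CLAIM (what is proved, stated in full; the proofs are below) =====
def Claim_equal_uconvert : Prop := ∀ (title : String), Dom_uconvert title → Spec_uconvert title (uconvert title)

-- ===== LEMMAS AND PROOFS =====

theorem isAlpha_iff (c : Char) :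
    c.isAlpha = true ↔ (('A'.toNat ≤ c.toNat ∧ c.toNat ≤ 'Z'.toNat) ∨ ('a'.toNat ≤ c.toNat ∧ c.toNat ≤ 'z'.toNat)) := by
  simp only [Char.isAlpha, Char.isUpper, Char.isLower, Bool.or_eq_true, Bool.and_eq_true,
    decide_eq_true_eq, ge_iff_le, UInt32.le_iff_toNat_le, Char.toNat]

theorem underscore_ofList : "_" = String.ofList ['_'] := by decide

theorem uconvert_fold (l : List Char) (acc : String) :
    l.foldl (fun res i =>
      if ('A'.toNat ≤ i.toNat ∧ i.toNat ≤ 'Z'.toNat) ∨ ('a'.toNat ≤ i.toNat ∧ i.toNat ≤ 'z'.toNat) then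
        res ++ String.ofList [i]
      else
        res ++ "_") acc
    = acc ++ String.ofList (subNonLetters l) := by
  induction l generalizing acc with
  | nil => simp [subNonLetters]
  | cons c l ih =>
    rw [List.foldl_cons]
    by_cases h : ('A'.toNat ≤ c.toNat ∧ c.toNat ≤ 'Z'.toNat) ∨ ('a'.toNat ≤ c.toNat ∧ c.toNat ≤ 'z'.toNat)
    · rw [if_pos h, ih, subNonLetters, if_pos ((isAlpha_iff c).mpr h),
        String.append_assoc, ← String.ofList_append, List.singleton_append]
    · rw [if_neg h, ih, subNonLetters, if_neg (fun hb => h ((isAlpha_iff c).mp hb)),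
        underscore_ofList, String.append_assoc, ← String.ofList_append, List.singleton_append]

-- ===== VERDICT (by name: the statement is the Claim_ definition above) =====
theorem uconvert_spec : Claim_equal_uconvert := by
  intro title _
  unfold Spec_uconvert uconvert uconvert_alt
  simpa using uconvert_fold title.toList ""
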